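-- pv_equiv track=rewrite | github.com/jhune-aguiba/UWA-Intro-to-Python- | CITS1401_Project2_226052324.py | conjunctions
-- ===== SOURCE A (Python) =====
-- def conjunctions(text): #returns count of required pieces of conjunction
--     for ch in '.,""?!:;_@#$%^&*()=+[]{}\|<>/':
--         text = text.replace(ch, ' ')
--     words = text.split()
--     conjunctionList = ["also", "although", "and", "as", "because", "before", "but",
--                        "for", "if", "nor", "of", "or", "since", "that", "though",
--                        "until", "when", "whenever", "whereas", "which", "while", "yet"]
--
--     conjunction = dict((c,0) for c in conjunctionList)
--     for word in words:
--         if word in conjunction: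
--             conjunction[word] += 1
--     return conjunction
-- ===== SOURCE B (Python) =====
-- def conjunctions(text):  # returns count of required pieces of conjunction
--     conjunctionList = ["also", "although", "and", "as", "because", "before", "but",
--                        "for", "if", "nor", "of", "or", "since", "that", "though",
--                        "until", "when", "whenever", "whereas", "which", "while", "yet"]
--     punctuation = '.,""?!:;_@#$%^&*()=+[]{}\|<>/'
--     counts = dict((c, 0) for c in conjunctionList)
--     # one fused scan: a character-level state machine that tokenizes and counts at once
--     word = ''
--     for ch in text:
--         if ch in punctuation or ch.isspace():
--             if word in counts:
--                 counts[word] += 1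
--             word = ''
--         else:
--             word += ch
--     if word in counts:
--         counts[word] += 1
--     return counts
-- ===== Notes on version B (the rewrite author's own statement) =====
-- stated objective: alternative
-- what changed: Replaces A's staged pipeline (22 whole-string replace passes, then split(), then a counting loop over the word list) with one fused character-level scan: a state machine that builds the current word and bumps its counter the moment a separator (punctuation or whitespace) ends it, so no replaced string and no word list are ever materialised.
import Mathlib
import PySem

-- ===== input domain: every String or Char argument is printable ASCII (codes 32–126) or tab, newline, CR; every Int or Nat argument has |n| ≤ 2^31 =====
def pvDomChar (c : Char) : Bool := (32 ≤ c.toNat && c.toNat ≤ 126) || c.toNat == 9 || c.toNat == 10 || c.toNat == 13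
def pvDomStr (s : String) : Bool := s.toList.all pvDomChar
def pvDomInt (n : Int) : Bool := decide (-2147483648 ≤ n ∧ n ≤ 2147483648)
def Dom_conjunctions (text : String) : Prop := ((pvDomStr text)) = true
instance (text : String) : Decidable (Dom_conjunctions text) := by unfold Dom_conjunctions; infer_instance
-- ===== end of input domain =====

-- B fuses A's staged pipeline (22 replace passes, split, counting loop) into one character-level
-- scan that tokenizes and counts in a single state machine (alternative; no speed claim).

def pvPunct : List Char := ".,\"\"?!:;_@#$%^&*()=+[]{}\\|<>/".toList

def pvConjList : List String :=
  ["also", "although", "and", "as", "because", "before", "but",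
   "for", "if", "nor", "of", "or", "since", "that", "though",
   "until", "when", "whenever", "whereas", "which", "while", "yet"]

-- ===== PORT A =====
def conjunctions (text : String) : List (String × Int) :=
  let text := pvPunct.foldl (fun t ch => PySem.Str.replace t (String.ofList [ch]) " ") text
  let words := PySem.Str.split₀ text
  let conj : PySem.Dict String Int := PySem.Dict.ofList (pvConjList.map (fun c => (c, (0 : Int))))
  let conj := words.foldl (fun d w => if d.contains w then d.insert w (d.getD w 0 + 1) else d) conj
  conj.items

-- ===== PORT B =====
-- one fused scan; state = (counts dict, current word); a separator flushes the word
def conjunctions_alt (text : String) : List (String × Int) :=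
  let counts : PySem.Dict String Int := PySem.Dict.ofList (pvConjList.map (fun c => (c, (0 : Int))))
  let st := text.toList.foldl
    (fun (st : PySem.Dict String Int × List Char) ch =>
      if pvPunct.contains ch || PySem.Chars.isspace ch then
        (if st.1.contains (String.ofList st.2) then
            st.1.insert (String.ofList st.2) (st.1.getD (String.ofList st.2) 0 + 1)
          else st.1, [])
      else (st.1, st.2 ++ [ch]))
    (counts, [])
  (if st.1.contains (String.ofList st.2) then
      st.1.insert (String.ofList st.2) (st.1.getD (String.ofList st.2) 0 + 1)
    else st.1).items

-- ===== PRECONDITION & SPEC =====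
def Spec_conjunctions (text : String) (out : List (String × Int)) : Prop := out = conjunctions_alt text
instance (text : String) (out : List (String × Int)) : Decidable (Spec_conjunctions text out) := by unfold Spec_conjunctions; infer_instance

-- ===== CLAIM (what is proved, stated in full; the proofs are below) =====
def Claim_equal_conjunctions : Prop := ∀ (text : String), Dom_conjunctions text → Spec_conjunctions text (conjunctions text)

-- ===== LEMMAS AND PROOFS =====

-- the char substitution a single replace pass performs
def pvSubst (p : Char) (c : Char) : Char := if c = p then ' ' else c

-- the net substitution of A's replace loop
def pvG (c : Char) : Char := if c ∈ pvPunct then ' ' else c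

-- A's per-word counting step
def pvAstep (d : PySem.Dict String Int) (w : String) : PySem.Dict String Int :=
  if d.contains w then d.insert w (d.getD w 0 + 1) else d

-- B's scan step
def pvBstep (st : PySem.Dict String Int × List Char) (ch : Char) : PySem.Dict String Int × List Char :=
  if pvPunct.contains ch || PySem.Chars.isspace ch then (pvAstep st.1 (String.ofList st.2), [])
  else (st.1, st.2 ++ [ch])

-- single-char replace is a character map
lemma pv_replace_go_single (p : Char) :
    ∀ (l : List Char) (fuel : Nat) (acc : List Char), l.length ≤ fuel →
      PySem.Chars.replace.go [p] [' '] fuel l acc = acc.reverse ++ l.map (pvSubst p) := by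
  intro l
  induction l with
  | nil =>
    intro fuel acc _
    cases fuel <;> simp [PySem.Chars.replace.go]
  | cons c t ih =>
    intro fuel acc hle
    cases fuel with
    | zero => exact absurd hle (by simp)
    | succ n =>
      simp only [PySem.Chars.replace.go]
      by_cases h : c = p
      · subst h
        rw [if_pos (by simp [List.isPrefixOf])]
        simp only [List.length_cons, List.length_nil, List.drop_succ_cons, List.drop_zero,
          List.reverse_cons, List.reverse_nil, List.nil_append, List.singleton_append]
        rw [ih n ((' ' :: acc)) (by simpa using Nat.le_of_succ_le_succ hle)]
        simp [pvSubst]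
      · rw [if_neg (by simp only [List.isPrefixOf, Bool.and_eq_true, beq_iff_eq]; exact fun he => h he.1.symm)]
        rw [ih n (c :: acc) (by simpa using Nat.le_of_succ_le_succ hle)]
        simp [pvSubst, h]

lemma pv_replace_single (p : Char) (l : List Char) :
    PySem.Chars.replace l [p] [' '] = l.map (pvSubst p) := by
  simp only [PySem.Chars.replace, List.isEmpty_cons]
  rw [if_neg (by simp)]
  simpa using pv_replace_go_single p l l.length [] (le_refl _)

-- the composed replace loop, over an arbitrary punctuation list
lemma pv_replace_fold (ps : List Char) (s : List Char) :
    ps.foldl (fun t p => t.map (pvSubst p)) s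
      = s.map (fun c => if c ∈ ps then ' ' else c) := by
  induction ps generalizing s with
  | nil => simp
  | cons p rest ih =>
    simp only [List.foldl_cons]
    rw [ih, List.map_map]
    refine List.map_congr_left (fun c _ => ?_)
    by_cases h : c = p
    · subst h; simp [pvSubst]
    · by_cases h2 : c ∈ rest <;> simp [pvSubst, h, h2]

-- A's replace loop, on the String level, is the map pvG
lemma pv_replace_loop (text : String) :
    (pvPunct.foldl (fun t ch => PySem.Str.replace t (String.ofList [ch]) " ") text).toList
      = text.toList.map pvG := by
  have key : ∀ (ps : List Char) (t : String),
      (ps.foldl (fun t ch => PySem.Str.replace t (String.ofList [ch]) " ") t).toList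
        = ps.foldl (fun l p => l.map (pvSubst p)) t.toList := by
    intro ps
    induction ps with
    | nil => intro t; rfl
    | cons p rest ih =>
      intro t
      simp only [List.foldl_cons]
      rw [ih]
      congr 1
      rw [PySem.Str.toList_replace]
      have h1 : (String.ofList [p]).toList = [p] := by simp
      have h2 : (" " : String).toList = [' '] := by decide
      rw [h1, h2, pv_replace_single]
  rw [key, pv_replace_fold]
  rfl

-- a separator of B corresponds to a whitespace char after pvG
lemma pv_isspace_g (c : Char) :
    PySem.Chars.isspace (pvG c) = (pvPunct.contains c || PySem.Chars.isspace c) := by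
  by_cases h : c ∈ pvPunct
  · have hc : pvPunct.contains c = true := by simpa using h
    rw [show pvG c = ' ' from by simp [pvG, h], hc, Bool.true_or]
    decide
  · have hc : pvPunct.contains c = false := by simpa using h
    rw [show pvG c = c from by simp [pvG, h], hc, Bool.false_or]

lemma pv_g_fix (c : Char) (h : (pvPunct.contains c || PySem.Chars.isspace c) = false) :
    pvG c = c := by
  simp only [Bool.or_eq_false_iff] at h
  have : c ∉ pvPunct := by simpa using h.1
  simp [pvG, this]

-- one-step equations of split₀.go (definitional)
lemma pv_go_nil (cur : List Char) (acc : List (List Char)) :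
    PySem.Chars.split₀.go [] cur acc
      = if cur.isEmpty = true then acc.reverse else (cur.reverse :: acc).reverse := rfl

lemma pv_go_cons (c : Char) (t cur : List Char) (acc : List (List Char)) :
    PySem.Chars.split₀.go (c :: t) cur acc
      = if PySem.Chars.isspace c = true then
          if cur.isEmpty = true then PySem.Chars.split₀.go t [] acc
          else PySem.Chars.split₀.go t [] (cur.reverse :: acc)
        else PySem.Chars.split₀.go t (c :: cur) acc := rfl

-- split₀.go's finished-word accumulator just prepends
lemma pv_split_go_acc (cs : List Char) :
    ∀ (cur : List Char) (acc : List (List Char)),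
      PySem.Chars.split₀.go cs cur acc = acc.reverse ++ PySem.Chars.split₀.go cs cur [] := by
  induction cs with
  | nil =>
    intro cur acc
    rw [pv_go_nil, pv_go_nil]
    by_cases h : cur.isEmpty <;> simp [h]
  | cons c t ih =>
    intro cur acc
    rw [pv_go_cons, pv_go_cons]
    by_cases hs : PySem.Chars.isspace c
    · by_cases hc : cur.isEmpty
      · simp only [hs, hc, if_true]
        exact ih [] acc
      · simp only [hs, hc, if_true, if_false, Bool.false_eq_true]
        rw [ih [] (cur.reverse :: acc), ih [] [cur.reverse]]
        simp
    · simp only [hs]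
      exact ih (c :: cur) acc

-- pvAstep never creates the empty-string key
lemma pv_astep_empty (d : PySem.Dict String Int) (w : String)
    (h : d.contains "" = false) : (pvAstep d w).contains "" = false := by
  unfold pvAstep
  by_cases hc : d.contains w
  · rw [if_pos hc, PySem.Dict.contains_insert]
    have hw : w ≠ "" := fun he => by rw [he] at hc; rw [h] at hc; exact Bool.false_ne_true hc
    simp [h, Ne.symm hw]
  · rwa [if_neg (by simp [hc])]

-- flushing the empty word is a no-op
lemma pv_astep_nil (d : PySem.Dict String Int) (h : d.contains "" = false) :
    pvAstep d "" = d := by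
  unfold pvAstep
  rw [if_neg (by simp [h])]

-- MAIN: B's fused scan equals A's counting fold over split₀ of the mapped text
lemma pv_scan (cs : List Char) :
    ∀ (cur : List Char) (d : PySem.Dict String Int), d.contains "" = false →
      pvAstep (cs.foldl pvBstep (d, cur)).1 (String.ofList (cs.foldl pvBstep (d, cur)).2)
        = ((PySem.Chars.split₀.go (cs.map pvG) cur.reverse []).map String.ofList).foldl pvAstep d := by
  induction cs with
  | nil =>
    intro cur d hd
    simp only [List.foldl_nil, List.map_nil]
    rw [pv_go_nil]
    by_cases hc : cur.isEmpty
    · have : cur = [] := by simpa using hc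
      subst this
      simp only [List.isEmpty_nil, List.reverse_nil]
      exact pv_astep_nil d hd
    · have hrev : cur.reverse.isEmpty = false := by
        simp only [List.isEmpty_reverse]; simpa using hc
      simp [hrev]
  | cons c t ih =>
    intro cur d hd
    simp only [List.foldl_cons, List.map_cons]
    rw [pv_go_cons, pv_isspace_g c]
    by_cases hsep : (pvPunct.contains c || PySem.Chars.isspace c) = true
    · have hstep : pvBstep (d, cur) c = (pvAstep d (String.ofList cur), []) := by
        simp only [pvBstep, hsep, if_pos]
      rw [hstep, hsep, if_pos rfl]
      by_cases hc : cur.isEmpty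
      · have hcur : cur = [] := by simpa using hc
        subst hcur
        simp only [List.reverse_nil, List.isEmpty_nil]
        have := ih [] (pvAstep d (String.ofList [])) (pv_astep_empty d _ hd)
        simp only [List.reverse_nil] at this
        rw [this]
        have h0 : pvAstep d (String.ofList []) = d := pv_astep_nil d hd
        rw [h0]
        simp
      · have hrev : cur.reverse.isEmpty = false := by
          simp only [List.isEmpty_reverse]; simpa using hc
        rw [hrev, if_neg (by simp)]
        have := ih [] (pvAstep d (String.ofList cur)) (pv_astep_empty d _ hd)
        simp only [List.reverse_nil] at this
        rw [this]
        rw [pv_split_go_acc (t.map pvG) [] [cur.reverse.reverse]]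
        simp only [List.reverse_cons, List.reverse_nil, List.nil_append, List.map_append,
          List.map_cons, List.map_nil, List.foldl_append, List.foldl_cons, List.foldl_nil,
          List.reverse_reverse]
    · have hsepf : (pvPunct.contains c || PySem.Chars.isspace c) = false := by
        simpa using hsep
      have hstep : pvBstep (d, cur) c = (d, cur ++ [c]) := by
        simp only [pvBstep, hsepf, Bool.false_eq_true, ite_false]
      rw [hstep, pv_g_fix c hsepf, hsepf, if_neg (by simp)]
      rw [ih (cur ++ [c]) d hd]
      simp

lemma pv_conj0_no_empty :
    (PySem.Dict.ofList (pvConjList.map (fun c => (c, (0 : Int))))).contains "" = false := by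
  decide

lemma pv_bridge (text : String) :
    (PySem.Str.split₀
        (pvPunct.foldl (fun t ch => PySem.Str.replace t (String.ofList [ch]) " ") text)).foldl
        pvAstep (PySem.Dict.ofList (pvConjList.map (fun c => (c, (0 : Int)))))
      = pvAstep
          (text.toList.foldl pvBstep
            (PySem.Dict.ofList (pvConjList.map (fun c => (c, (0 : Int)))), [])).1
          (String.ofList
            (text.toList.foldl pvBstep
              (PySem.Dict.ofList (pvConjList.map (fun c => (c, (0 : Int)))), [])).2) := by
  have hwords :
      PySem.Str.split₀ (pvPunct.foldl (fun t ch => PySem.Str.replace t (String.ofList [ch]) " ") text)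
        = (PySem.Chars.split₀ (text.toList.map pvG)).map String.ofList := by
    rw [PySem.Str.split₀, pv_replace_loop]
  rw [hwords]
  have h := pv_scan text.toList []
      (PySem.Dict.ofList (pvConjList.map (fun c => (c, (0 : Int))))) pv_conj0_no_empty
  simp only [List.reverse_nil] at h
  rw [h, PySem.Chars.split₀]

-- ===== VERDICT (by name: the statement is the Claim_ definition above) =====
theorem conjunctions_spec : Claim_equal_conjunctions := by
  intro text _
  exact congrArg PySem.Dict.items (pv_bridge text)
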